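-- pv_equiv track=rewrite | github.com/KilianLP/SIMA-EEG-PRAML | datasets/CHB-MIT/process1_bis.py | _parse_channel_block
-- ===== SOURCE A (Python) =====
-- from typing import Dict, List, Optional
--
-- def _parse_channel_block(lines: List[str], start_idx: int) -> (Dict[str, int], int):
--     """
--     Consume consecutive 'Channel X: LABEL' lines starting at start_idx.
--     Returns the channel map and the index of the first non-channel line.
--     """
--     mapping: Dict[str, int] = {}
--     idx = start_idx
--     while idx < len(lines):
--         line = lines[idx].strip()
--         if not line.startswith("Channel"):
--             break
--         parts = line.split(":", maxsplit=1)
--         if len(parts) == 2: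
--             try:
--                 channel_num = int(parts[0].split()[1])
--                 label = parts[1].strip()
--                 mapping[label] = channel_num
--             except (IndexError, ValueError):
--                 pass
--         idx += 1
--     return mapping, idx
-- ===== SOURCE B (Python) =====
-- def _parse_channel_block(lines, start_idx):
--     # Pass 1: the block boundary depends only on the startswith test.
--     end = start_idx
--     while end < len(lines) and lines[end].strip().startswith("Channel"):
--         end += 1
--     # Pass 2: parse exactly the lines of the block (later duplicates overwrite).
--     mapping = {}
--     for i in range(start_idx, end):
--         parts = lines[i].strip().split(":", maxsplit=1)
--         if len(parts) == 2:
--             try: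
--                 channel_num = int(parts[0].split()[1])
--                 mapping[parts[1].strip()] = channel_num
--             except (IndexError, ValueError):
--                 pass
--     return mapping, end
-- ===== Notes on version B (the rewrite author's own statement) =====
-- stated objective: idiomatic
-- what changed: A's single fused while-loop (advance index and parse in one pass) is decomposed into two passes: first a boundary scan that finds the end of the 'Channel' block using only the startswith test, then a for-loop over exactly that range that builds the mapping with the same skip-on-failure and last-duplicate-wins semantics.
import Mathlib
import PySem

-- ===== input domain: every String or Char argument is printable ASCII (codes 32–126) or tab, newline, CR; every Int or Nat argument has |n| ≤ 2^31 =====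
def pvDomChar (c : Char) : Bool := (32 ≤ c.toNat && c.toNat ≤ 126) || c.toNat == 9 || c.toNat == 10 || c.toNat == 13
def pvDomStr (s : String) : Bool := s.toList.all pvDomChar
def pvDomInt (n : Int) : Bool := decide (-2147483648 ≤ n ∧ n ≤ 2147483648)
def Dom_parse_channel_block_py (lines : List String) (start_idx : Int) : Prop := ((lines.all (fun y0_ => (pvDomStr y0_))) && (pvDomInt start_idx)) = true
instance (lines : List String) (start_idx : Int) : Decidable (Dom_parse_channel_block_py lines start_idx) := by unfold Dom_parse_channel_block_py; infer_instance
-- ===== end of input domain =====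

-- B splits A's fused while-loop into two passes: first find the block boundary (startswith test only),
-- then build the mapping over exactly that range; objective: idiomatic decomposition, same cost.


-- ===== PORT A =====
-- parse one (already stripped) line into the mapping: the shared body
--   parts = line.split(":", 1); if len==2: try mapping[parts[1].strip()] = int(parts[0].split()[1])
-- (identical source text in A and B)
def pcbParse (line : String) (mapping : PySem.Dict String Int) : PySem.Dict String Int :=
  match PySem.Str.splitMax? line ":" 1 with
  | none => mapping          -- unreachable: separator ":" is nonempty
  | some parts =>
    if parts.length = 2 then
      match PySem.List.pyGet? (PySem.Str.split₀ (parts.getD 0 "")) 1 with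
      | none => mapping      -- IndexError swallowed
      | some w =>
        match PySem.Int.ofStr? w with
        | none => mapping    -- ValueError swallowed
        | some n => mapping.insert (PySem.Str.strip (parts.getD 1 "")) n
    else mapping

-- A's while-loop: fuel = number of remaining indices below len(lines)
def pcbLoopA (lines : List String) : Nat → Int → PySem.Dict String Int → PySem.Dict String Int × Int
  | 0, idx, m => (m, idx)
  | fuel+1, idx, m =>
    if idx < (lines.length : Int) then
      match PySem.List.pyGet? lines idx with
      | none => (m, idx)     -- IndexError (raises in Python; excluded by Pre_)
      | some s =>
        let line := PySem.Str.strip s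
        if PySem.Str.startswith line "Channel" then
          pcbLoopA lines fuel (idx + 1) (pcbParse line m)
        else (m, idx)
    else (m, idx)

def parse_channel_block_py (lines : List String) (start_idx : Int) : (List (String × Int)) × Int :=
  let r := pcbLoopA lines ((lines.length : Int) - start_idx).toNat start_idx PySem.Dict.empty
  (r.1.items, r.2)

-- ===== PORT B =====
-- pass 1: the boundary scan (startswith test only)
def pcbEnd (lines : List String) : Nat → Int → Int
  | 0, e => e
  | fuel+1, e =>
    if e < (lines.length : Int) then
      match PySem.List.pyGet? lines e with
      | none => e            -- IndexError (raises in Python; excluded by Pre_)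
      | some s =>
        if PySem.Str.startswith (PySem.Str.strip s) "Channel" then pcbEnd lines fuel (e + 1) else e
    else e

-- pass 2 body: parse lines[i]
def pcbStep (lines : List String) (m : PySem.Dict String Int) (i : Int) : PySem.Dict String Int :=
  match PySem.List.pyGet? lines i with
  | none => m
  | some s => pcbParse (PySem.Str.strip s) m

def parse_channel_block_py_alt (lines : List String) (start_idx : Int) : (List (String × Int)) × Int :=
  let e := pcbEnd lines ((lines.length : Int) - start_idx).toNat start_idx
  let m := (PySem.List.pyRange start_idx e 1).foldl (pcbStep lines) PySem.Dict.empty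
  (m.items, e)

-- ===== PRECONDITION & SPEC =====
-- Python A raises IndexError exactly when start_idx < -len(lines) (the first lines[idx] access wraps out of range);
-- B raises on the same inputs; Pre_ excludes exactly those.
def Pre_parse_channel_block_py (lines : List String) (start_idx : Int) : Prop :=
  -(lines.length : Int) ≤ start_idx
instance (lines : List String) (start_idx : Int) : Decidable (Pre_parse_channel_block_py lines start_idx) := by unfold Pre_parse_channel_block_py; infer_instance

def pvWitness_parse_channel_block_py : List String × Int := (["Channel 1: FP1", "Channel 2: C3", "end"], 0)

def Spec_parse_channel_block_py (lines : List String) (start_idx : Int) (out : (List (String × Int)) × Int) : Prop := out = parse_channel_block_py_alt lines start_idx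
instance (lines : List String) (start_idx : Int) (out : (List (String × Int)) × Int) : Decidable (Spec_parse_channel_block_py lines start_idx out) := by unfold Spec_parse_channel_block_py; infer_instance

-- ===== CLAIM (what is proved, stated in full; the proofs are below) =====
def Claim_equal_parse_channel_block_py : Prop := ∀ (lines : List String) (start_idx : Int), Dom_parse_channel_block_py lines start_idx → Pre_parse_channel_block_py lines start_idx → Spec_parse_channel_block_py lines start_idx (parse_channel_block_py lines start_idx)

-- ===== LEMMAS AND PROOFS =====

-- the boundary never moves backwards
lemma pcbEnd_ge (lines : List String) (fuel : Nat) (e : Int) : e ≤ pcbEnd lines fuel e := by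
  induction fuel generalizing e with
  | zero => simp [pcbEnd]
  | succ fuel ih =>
    simp only [pcbEnd]
    split_ifs with h
    · cases hg : PySem.List.pyGet? lines e with
      | none => simp
      | some s =>
        simp only
        split_ifs with hs
        · exact le_trans (by omega) (ih (e + 1))
        · simp
    · simp

-- A's fused loop equals: fold the parse step over the range up to the boundary
lemma pcbLoopA_eq (lines : List String) (fuel : Nat) (idx : Int) (m : PySem.Dict String Int) :
    pcbLoopA lines fuel idx m =
      ((PySem.List.pyRange idx (pcbEnd lines fuel idx) 1).foldl (pcbStep lines) m,
        pcbEnd lines fuel idx) := by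
  induction fuel generalizing idx m with
  | zero => simp [pcbLoopA, pcbEnd, PySem.List.pyRange_one_eq_nil le_rfl]
  | succ fuel ih =>
    simp only [pcbLoopA, pcbEnd]
    split_ifs with h
    · cases hg : PySem.List.pyGet? lines idx with
      | none => simp [PySem.List.pyRange_one_eq_nil le_rfl]
      | some s =>
        simp only
        split_ifs with hs
        · have hlt : idx < pcbEnd lines fuel (idx + 1) :=
            lt_of_lt_of_le (by omega) (pcbEnd_ge lines fuel (idx + 1))
          rw [ih, PySem.List.pyRange_one_cons hlt]
          simp [pcbStep, hg]
        · simp [PySem.List.pyRange_one_eq_nil le_rfl]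
    · simp [PySem.List.pyRange_one_eq_nil le_rfl]

-- ===== VERDICT (by name: the statement is the Claim_ definition above) =====
theorem parse_channel_block_py_spec : Claim_equal_parse_channel_block_py := by
  intro lines start_idx _ _
  unfold Spec_parse_channel_block_py parse_channel_block_py parse_channel_block_py_alt
  rw [pcbLoopA_eq]
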